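-- pv_equiv track=rewrite | github.com/mr-asa/comfyui_utils | update_workflow_repos.py | _windows_path_is_invalid
-- ===== SOURCE A (Python) =====
-- def _windows_path_is_invalid(repo_rel_path: str) -> bool:
--     """
--     Best-effort check for filenames that Windows cannot represent.
--     This is not exhaustive, but catches the common hard failures (e.g. '|', '*', '?', etc).
--     """
--     invalid_chars = set('<>:"|?*')
--     parts = repo_rel_path.split("/")
--     for part in parts:
--         if not part:
--             continue
--         if any(c in invalid_chars for c in part):
--             return True
--         if part.endswith(" ") or part.endswith("."):
--             return True
--     return False
-- ===== SOURCE B (Python) =====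
-- def _windows_path_is_invalid(repo_rel_path: str) -> bool:
--     # Single left-to-right scan: no splitting; a space/dot is bad exactly when
--     # it sits immediately before a '/' or at the end of the string.
--     n = len(repo_rel_path)
--     for i, c in enumerate(repo_rel_path):
--         if c in '<>:"|?*':
--             return True
--         if c in ' .' and (i + 1 == n or repo_rel_path[i + 1] == '/'):
--             return True
--     return False
-- ===== Notes on version B (the rewrite author's own statement) =====
-- stated objective: simpler
-- what changed: B drops the split('/')-then-per-part loop and does one left-to-right scan of the string, flagging an invalid character directly and a space/dot exactly when it is immediately followed by '/' or the end of the string.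
import Mathlib
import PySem

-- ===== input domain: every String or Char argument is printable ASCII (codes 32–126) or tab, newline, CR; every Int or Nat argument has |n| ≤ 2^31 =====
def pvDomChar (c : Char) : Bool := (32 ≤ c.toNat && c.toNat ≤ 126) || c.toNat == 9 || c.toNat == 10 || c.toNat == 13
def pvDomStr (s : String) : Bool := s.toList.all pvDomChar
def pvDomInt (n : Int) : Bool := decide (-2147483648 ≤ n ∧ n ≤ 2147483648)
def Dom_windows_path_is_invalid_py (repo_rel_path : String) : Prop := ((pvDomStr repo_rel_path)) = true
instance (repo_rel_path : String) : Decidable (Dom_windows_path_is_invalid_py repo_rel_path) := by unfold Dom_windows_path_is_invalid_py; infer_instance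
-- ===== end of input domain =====

-- B replaces A's split-on-'/'-then-per-part loop by one left-to-right scan with
-- a one-character lookahead (simpler: no intermediate list of parts).

-- ===== PORT A =====
-- invalid_chars = set('<>:"|?*')
def pvInvalidChars : PySem.Set Char := PySem.Set.ofList "<>:\"|?*".toList

-- the body of A's per-part loop (early 'return True' ⇒ List.any; 'continue' on empty part)
def pvPartBad (part : List Char) : Bool :=
  if part.isEmpty then false
  else if part.any (fun c => PySem.Set.contains pvInvalidChars c) then true
  else PySem.Chars.endswith part [' '] || PySem.Chars.endswith part ['.']

def windows_path_is_invalid_py (repo_rel_path : String) : Bool :=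
  (PySem.Chars.splitOn repo_rel_path.toList "/".toList).any pvPartBad

-- ===== PORT B =====
-- Source B's enumerate loop: the index lookahead repo_rel_path[i+1] is the head of the rest
def pvScan : List Char → Bool
  | [] => false
  | c :: rest =>
    if "<>:\"|?*".toList.contains c then true
    else if " .".toList.contains c && (rest.isEmpty || rest.head? == some '/') then true
    else pvScan rest

def windows_path_is_invalid_py_alt (repo_rel_path : String) : Bool :=
  pvScan repo_rel_path.toList

-- ===== PRECONDITION & SPEC =====
def Spec_windows_path_is_invalid_py (repo_rel_path : String) (out : Bool) : Prop := out = windows_path_is_invalid_py_alt repo_rel_path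
instance (repo_rel_path : String) (out : Bool) : Decidable (Spec_windows_path_is_invalid_py repo_rel_path out) := by unfold Spec_windows_path_is_invalid_py; infer_instance

-- ===== CLAIM (what is proved, stated in full; the proofs are below) =====
def Claim_equal_windows_path_is_invalid_py : Prop := ∀ (repo_rel_path : String), Dom_windows_path_is_invalid_py repo_rel_path → Spec_windows_path_is_invalid_py repo_rel_path (windows_path_is_invalid_py repo_rel_path)

-- ===== LEMMAS AND PROOFS =====
-- 'part is nonempty and its first char (= last char of the part being built, stored reversed) is space/dot'
def pvPend : List Char → Bool
  | [] => false
  | c :: _ => c = ' ' || c = '.'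

-- 'the part currently being built ends here': the remaining input is empty or starts with '/'
def pvEndNow : List Char → Bool
  | [] => true
  | c :: _ => c = '/'

def pvInv (c : Char) : Bool := "<>:\"|?*".toList.contains c

theorem pvContains_invalid (c : Char) :
    PySem.Set.contains pvInvalidChars c = pvInv c := by
  have h : pvInvalidChars = "<>:\"|?*".toList := by decide
  simp [PySem.Set.contains, h, pvInv]

theorem pvEndswith_single (l : List Char) (a : Char) :
    PySem.Chars.endswith l [a] = (l.getLast? == some a) := by
  induction l using List.reverseRecOn with
  | nil => simp [PySem.Chars.endswith, List.isSuffixOf]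
  | append_singleton xs x _ =>
      simp [PySem.Chars.endswith, List.isSuffixOf, List.isPrefixOf, eq_comm]

theorem pvPartBad_eq (p : List Char) :
    pvPartBad p = (p.any pvInv || ((p.getLast? == some ' ') || (p.getLast? == some '.'))) := by
  cases p with
  | nil => simp [pvPartBad]
  | cons c cs =>
      simp only [pvPartBad, List.isEmpty_cons, pvEndswith_single, pvContains_invalid]
      by_cases h : (c :: cs).any pvInv
      · simp [h]
      · simp [h]

theorem pvPend_eq (cur : List Char) :
    ((cur.head? == some ' ') || (cur.head? == some '.')) = pvPend cur := by
  cases cur with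
  | nil => simp [pvPend]
  | cons c cs => rw [pvPend, Bool.eq_iff_iff]; simp

theorem pvGo_any (l : List Char) : ∀ (fuel : Nat) (cur : List Char) (acc : List (List Char)),
    l.length ≤ fuel →
    (PySem.Chars.splitOn.go ['/'] fuel l cur acc).any pvPartBad =
      (acc.any pvPartBad || cur.any pvInv || (pvPend cur && pvEndNow l) || pvScan l) := by
  induction l with
  | nil =>
      intro fuel cur acc _
      have hgo : PySem.Chars.splitOn.go ['/'] fuel [] cur acc = (cur.reverse :: acc).reverse := by
        cases fuel <;> simp [PySem.Chars.splitOn.go]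
      rw [hgo, List.any_reverse, List.any_cons, pvPartBad_eq, List.any_reverse,
        List.getLast?_reverse, pvPend_eq]
      simp only [pvEndNow, pvScan]
      cases acc.any pvPartBad <;> cases cur.any pvInv <;> cases pvPend cur <;> simp
  | cons c rest ih =>
      intro fuel cur acc hf
      cases fuel with
      | zero => simp at hf
      | succ fuel =>
          have hrest : rest.length ≤ fuel := by simpa using hf
          by_cases hc : c = '/'
          · subst hc
            have hgo : PySem.Chars.splitOn.go ['/'] (fuel + 1) ('/' :: rest) cur acc
                = PySem.Chars.splitOn.go ['/'] fuel rest [] (cur.reverse :: acc) := by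
              simp [PySem.Chars.splitOn.go, List.isPrefixOf]
            rw [hgo, ih fuel [] (cur.reverse :: acc) hrest, List.any_cons, pvPartBad_eq,
              List.any_reverse, List.getLast?_reverse, pvPend_eq]
            have hs : pvScan ('/' :: rest) = pvScan rest := by
              rw [pvScan, Bool.eq_iff_iff]; simp
            simp only [pvPend, pvEndNow, hs, List.any_nil]
            cases acc.any pvPartBad <;> cases cur.any pvInv <;> cases pvPend cur <;>
              cases pvScan rest <;> simp
          · have hgo : PySem.Chars.splitOn.go ['/'] (fuel + 1) (c :: rest) cur acc
                = PySem.Chars.splitOn.go ['/'] fuel rest (c :: cur) acc := by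
              simp only [PySem.Chars.splitOn.go, List.isPrefixOf, Bool.and_true]
              rw [if_neg]
              intro h
              exact hc ((by simpa using h : ('/' : Char) = c)).symm
            rw [hgo, ih fuel (c :: cur) acc hrest]
            have hEnd : (rest.isEmpty || rest.head? == some '/') = pvEndNow rest := by
              cases rest with
              | nil => simp [pvEndNow]
              | cons h t => rw [pvEndNow, Bool.eq_iff_iff]; simp
            rw [List.any_cons]
            show (acc.any pvPartBad || (pvInv c || cur.any pvInv) ||
                pvPend (c :: cur) && pvEndNow rest || pvScan rest) = _
            rw [pvScan, hEnd]
            have hEnd2 : pvEndNow (c :: rest) = false := by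
              rw [pvEndNow, Bool.eq_iff_iff]; simp [hc]
            have hPend2 : pvPend (c :: cur) = " .".toList.contains c := by
              rw [pvPend, Bool.eq_iff_iff]; simp
            rw [hEnd2, hPend2]
            show _ = (acc.any pvPartBad || cur.any pvInv || pvPend cur && false ||
                (if pvInv c then true else
                  if " .".toList.contains c && pvEndNow rest then true else pvScan rest))
            cases acc.any pvPartBad <;> cases cur.any pvInv <;> cases pvPend cur <;>
              cases pvInv c <;> cases (" .".toList.contains c) <;>
              cases pvEndNow rest <;> cases pvScan rest <;> simp
  
-- ===== VERDICT (by name: the statement is the Claim_ definition above) =====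
theorem windows_path_is_invalid_py_spec : Claim_equal_windows_path_is_invalid_py := by
  intro s _
  show windows_path_is_invalid_py s = windows_path_is_invalid_py_alt s
  unfold windows_path_is_invalid_py windows_path_is_invalid_py_alt PySem.Chars.splitOn
  rw [show ("/".toList) = ['/'] from rfl,
    pvGo_any s.toList (s.toList.length + 1) [] [] (by omega)]
  simp [pvPend]
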